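-- pv_equiv track=rewrite | github.com/CsnowyLstar/HoGRC | models/utils/ElementaryFunctionsPool.py | elementary_functions_name
-- ===== SOURCE A (Python) =====
-- import itertools as it
--
-- def elementary_functions_name(dimensionList,order):
--     Combination_func = list(it.combinations_with_replacement(dimensionList,order))
--     Num_of_func = len(Combination_func)
--     Name_of_func = []
--     for i in range(0,Num_of_func):
--         tmp = "".join(Combination_func[i])
--         Name_of_func.append(tmp)
--     return Num_of_func, Name_of_func
-- ===== SOURCE B (Python) =====
-- def elementary_functions_name(dimensionList, order):
--     # Alternative: recurse over the dimension list itself, choosing how many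
--     # copies of the first dimension a name contains, and build each name string
--     # directly by repetition/concatenation -- no itertools tuples, no join loop.
--     def go(prefix, items, r):
--         if r == 0:
--             return [prefix]
--         if not items:
--             return []
--         head, rest = items[0], items[1:]
--         out = []
--         for rem in range(r + 1):
--             out.extend(go(prefix + head * (r - rem), rest, rem))
--         return out
--     names = go("", dimensionList, order)
--     return len(names), names
-- ===== Notes on version B (the rewrite author's own statement) =====
-- stated objective: alternative
-- what changed: Replaces the itertools.combinations_with_replacement call plus a join-per-tuple indexing loop by a recursion over the dimension list that chooses how many copies of the head dimension each name contains and builds the name strings directly by repetition and concatenation, never materialising tuples.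
import Mathlib
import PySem

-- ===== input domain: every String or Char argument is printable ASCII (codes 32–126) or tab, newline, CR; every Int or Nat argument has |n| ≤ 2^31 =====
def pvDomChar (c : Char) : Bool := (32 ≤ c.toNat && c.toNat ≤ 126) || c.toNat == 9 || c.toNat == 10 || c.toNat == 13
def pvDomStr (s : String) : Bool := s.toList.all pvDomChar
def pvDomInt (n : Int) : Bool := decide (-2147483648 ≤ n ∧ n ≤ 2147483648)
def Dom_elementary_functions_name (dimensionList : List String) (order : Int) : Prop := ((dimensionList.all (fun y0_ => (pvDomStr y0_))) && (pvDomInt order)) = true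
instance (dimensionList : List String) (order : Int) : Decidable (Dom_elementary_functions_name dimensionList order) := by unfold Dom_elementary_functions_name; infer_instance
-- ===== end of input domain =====

-- B replaces the itertools tuple list + join loop by a recursion over the dimension
-- list choosing how many copies of the head each name gets, building the strings
-- directly (objective: alternative; same return value on Pre_).

-- ===== PORT A =====
-- itertools.combinations_with_replacement(pool, r) in its lexicographic (index)
-- order: the standard recursive characterisation of that library call.
def pvCwr (pool : List String) (r : Nat) : List (List String) :=
  match r, pool with
  | 0, _ => [[]]
  | _ + 1, [] => []
  | r + 1, x :: xs => ((pvCwr (x :: xs) r).map (fun c => x :: c)) ++ pvCwr xs (r + 1)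
termination_by (r, pool.length)

def elementary_functions_name (dimensionList : List String) (order : Int) : Int × List String :=
  let combinationFunc := pvCwr dimensionList order.toNat
  let numOfFunc : Int := PySem.List.len combinationFunc
  -- for i in range(0, Num_of_func): Name_of_func.append("".join(Combination_func[i]))
  let nameOfFunc := (PySem.List.pyRange 0 numOfFunc 1).foldl
    (fun acc i => acc ++ [PySem.Str.join "" (PySem.List.pyGetD combinationFunc i [])]) []
  (numOfFunc, nameOfFunc)

-- ===== PORT B =====
-- Python's  s * c  (string repetition; empty for c ≤ 0) — exact via join of c copies.
def pvRepeat (s : String) (c : Int) : String := PySem.Str.join "" (List.replicate c.toNat s)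

def pvGo (pre : String) (items : List String) (r : Int) : List String :=
  if r = 0 then [pre]
  else
    match items with
    | [] => []
    | x :: xs =>
      -- for rem in range(r + 1): out.extend(go(prefix + head * (r - rem), rest, rem))
      (PySem.List.pyRange 0 (r + 1) 1).foldl
        (fun acc rem => acc ++ pvGo (pre ++ pvRepeat x (r - rem)) xs rem) []

def elementary_functions_name_alt (dimensionList : List String) (order : Int) : Int × List String :=
  let names := pvGo "" dimensionList order
  ((PySem.List.len names : Int), names)

-- ===== PRECONDITION & SPEC =====
-- Pre_ excludes order < 0, on which Python A raises ValueError (itertools rejects negative r).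
def Pre_elementary_functions_name (dimensionList : List String) (order : Int) : Prop := 0 ≤ order
instance (dimensionList : List String) (order : Int) : Decidable (Pre_elementary_functions_name dimensionList order) := by unfold Pre_elementary_functions_name; infer_instance

def pvWitness_elementary_functions_name : List String × Int := (["x", "y"], 2)

def Spec_elementary_functions_name (dimensionList : List String) (order : Int) (out : Int × List String) : Prop := out = elementary_functions_name_alt dimensionList order
instance (dimensionList : List String) (order : Int) (out : Int × List String) : Decidable (Spec_elementary_functions_name dimensionList order out) := by unfold Spec_elementary_functions_name; infer_instance

-- ===== CLAIM (what is proved, stated in full; the proofs are below) =====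
def Claim_equal_elementary_functions_name : Prop := ∀ (dimensionList : List String) (order : Int), Dom_elementary_functions_name dimensionList order → Pre_elementary_functions_name dimensionList order → Spec_elementary_functions_name dimensionList order (elementary_functions_name dimensionList order)

-- ===== LEMMAS AND PROOFS =====

lemma pvFlattenIntersperseNil : ∀ (l : List (List Char)),
    (List.intersperse ([] : List Char) l).flatten = l.flatten
  | [] => rfl
  | [_] => rfl
  | a :: b :: t => by
    simpa [List.intersperse] using pvFlattenIntersperseNil (b :: t)

lemma pvJoinEmptyNil : PySem.Str.join "" [] = "" := by
  simp [PySem.Str.join, PySem.Chars.join, List.intercalate]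

lemma pvJoinEmptyCons (x : String) (r : List String) :
    PySem.Str.join "" (x :: r) = x ++ PySem.Str.join "" r := by
  simp [PySem.Str.join, PySem.Chars.join, List.intercalate, pvFlattenIntersperseNil]

lemma pvJoinEmptyAppend (a b : List String) :
    PySem.Str.join "" (a ++ b) = PySem.Str.join "" a ++ PySem.Str.join "" b := by
  induction a with
  | nil => simp [pvJoinEmptyNil]
  | cons x xs ih => simp [pvJoinEmptyCons, ih, String.append_assoc]

-- A's index loop over range(len(comb)) collects exactly the joins, in order.
lemma pvNamesLoop (comb : List (List String)) :
    (PySem.List.pyRange 0 (PySem.List.len comb) 1).foldl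
      (fun acc i => acc ++ [PySem.Str.join "" (PySem.List.pyGetD comb i [])]) []
    = comb.map (fun c => PySem.Str.join "" c) := by
  rw [PySem.List.foldl_append_singleton_eq_map, List.nil_append]
  have hcomp : (fun i => PySem.Str.join "" (PySem.List.pyGetD comb i []))
      = (fun c => PySem.Str.join "" c) ∘ (fun i => PySem.List.pyGetD comb i []) := rfl
  rw [hcomp, ← List.map_map, PySem.List.map_pyGetD_pyRange_zero]

-- A's combinations, grouped by how many leading copies of the head they contain.
lemma pvCwrGroup : ∀ (n : Nat) (x : String) (xs : List String),
    pvCwr (x :: xs) n = (List.range (n + 1)).flatMap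
      (fun rem => (pvCwr xs rem).map (fun t => List.replicate (n - rem) x ++ t))
  | 0, x, xs => by simp [pvCwr]
  | n + 1, x, xs => by
    conv_lhs => rw [pvCwr]
    rw [pvCwrGroup n x xs, List.map_flatMap]
    conv_rhs => rw [List.range_succ, List.flatMap_append]
    congr 1
    · apply List.flatMap_congr
      intro rem hrem
      rw [List.map_map]
      apply List.map_congr_left
      intro t _
      have : n + 1 - rem = (n - rem) + 1 := by
        have := List.mem_range.mp hrem; omega
      simp [this, List.replicate_succ, Function.comp]
    · simp

-- The bridge: B's count-of-head recursion produces the joins of A's tuples.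
lemma pvGoEq : ∀ (items : List String) (n : Nat) (pre : String),
    pvGo pre items ((n : Nat) : Int)
      = (pvCwr items n).map (fun c => pre ++ PySem.Str.join "" c)
  | [], n, pre => by
    cases n with
    | zero => simp [pvGo, pvCwr, pvJoinEmptyNil]
    | succ m =>
      simp [pvGo, pvCwr]
      omega
  | x :: xs, n, pre => by
    cases n with
    | zero => simp [pvGo, pvCwr, pvJoinEmptyNil]
    | succ m =>
      have hne : ((m + 1 : Nat) : Int) ≠ 0 := by omega
      rw [pvGo]
      simp only [hne, if_false]
      rw [PySem.List.foldl_append_eq_flatMap, List.nil_append]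
      have hrange : PySem.List.pyRange 0 (((m + 1 : Nat) : Int) + 1) 1
          = (List.range (m + 2)).map (fun k : Nat => (k : Int)) := by
        rw [PySem.List.pyRange_one]
        have : ((((m + 1 : Nat) : Int) + 1) - 0).toNat = m + 2 := by omega
        rw [this]
        simp only [zero_add]
      rw [hrange, List.flatMap_map]
      have h22 : List.range (m + 1 + 1) = List.range (m + 2) := rfl
      rw [pvCwrGroup (m + 1) x xs, List.map_flatMap, h22]
      apply List.flatMap_congr
      intro k hk
      have hk' : k ≤ m + 1 := by have := List.mem_range.mp hk; omega
      have hsub : ((m + 1 : Nat) : Int) - (k : Int) = ((m + 1 - k : Nat) : Int) := by omega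
      have hrep : pvRepeat x (((m + 1 : Nat) : Int) - (k : Int))
          = PySem.Str.join "" (List.replicate (m + 1 - k) x) := by
        rw [hsub]; simp [pvRepeat]
      rw [hrep, pvGoEq xs k (pre ++ PySem.Str.join "" (List.replicate (m + 1 - k) x)),
          List.map_map]
      apply List.map_congr_left
      intro t _
      have hj : PySem.Str.join "" (List.replicate (m + 1 - k) x ++ t)
          = PySem.Str.join "" (List.replicate (m + 1 - k) x) ++ PySem.Str.join "" t :=
        pvJoinEmptyAppend _ _
      simp [Function.comp, hj, String.append_assoc]

-- ===== VERDICT (by name: the statement is the Claim_ definition above) =====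
theorem elementary_functions_name_spec : Claim_equal_elementary_functions_name := by
  intro dimensionList order _ hpre
  unfold Spec_elementary_functions_name elementary_functions_name elementary_functions_name_alt
  dsimp only
  rw [pvNamesLoop]
  have h := pvGoEq dimensionList order.toNat ""
  rw [Int.toNat_of_nonneg hpre] at h
  rw [h]
  simp [PySem.List.len]
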